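-- pv_equiv track=rewrite | github.com/julienc91/adventofcode | 2025/02/02.py | find_complex_invalid_ids
-- ===== SOURCE A (Python) =====
-- def find_complex_invalid_ids(a: int, b: int) -> set[int]:
--     res = set()
--     patterns = set()
--     idx = a
--     while idx <= b:
--         for prefix_length in range(1, len(str(a)) + 1):
--             pattern = str(idx)[:prefix_length]
--             if pattern in patterns:
--                 continue
--
--             patterns.add(pattern)
--             repeat = 2
--             while True:
--                 candidate = int(str(pattern) * repeat)
--                 if candidate > b:
--                     break
--                 elif candidate >= a:
--                     res.add(candidate)
--                 repeat += 1
--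
--             if repeat == 2:
--                 break
--
--         idx += 1
--     return res
-- ===== SOURCE B (Python) =====
-- def find_complex_invalid_ids(a: int, b: int) -> set[int]:
--     L = len(str(a))
--     seen = {}
--     found = {}
--     idx = a
--     while idx <= b:
--         s = str(idx)
--         if s[:L] in seen:
--             # every prefix (length <= L) stays the same until the next multiple of 10**m:
--             # skip the whole block in one arithmetic jump
--             m = len(s) - L
--             step = 10 ** m
--             idx = (idx // step + 1) * step
--             continue
--         p = ""
--         for ch in s[:L]:
--             p = p + ch
--             if p in seen:
--                 continue
--             seen[p] = None
--             t = p + p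
--             c = int(t)
--             if c > b:
--                 break
--             while c <= b:
--                 if c >= a:
--                     found[c] = None
--                 t = t + p
--                 c = int(t)
--         idx = idx + 1
--     return set(found)
-- ===== Notes on version B (the rewrite author's own statement) =====
-- stated objective: faster
-- what changed: B skips, in one arithmetic jump per block, every maximal run of consecutive idx values whose length-<=L prefixes are all already known (they share the same top-L digits), instead of A's per-idx prefix rescan, and builds prefixes and repeated strings incrementally.
import Mathlib
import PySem

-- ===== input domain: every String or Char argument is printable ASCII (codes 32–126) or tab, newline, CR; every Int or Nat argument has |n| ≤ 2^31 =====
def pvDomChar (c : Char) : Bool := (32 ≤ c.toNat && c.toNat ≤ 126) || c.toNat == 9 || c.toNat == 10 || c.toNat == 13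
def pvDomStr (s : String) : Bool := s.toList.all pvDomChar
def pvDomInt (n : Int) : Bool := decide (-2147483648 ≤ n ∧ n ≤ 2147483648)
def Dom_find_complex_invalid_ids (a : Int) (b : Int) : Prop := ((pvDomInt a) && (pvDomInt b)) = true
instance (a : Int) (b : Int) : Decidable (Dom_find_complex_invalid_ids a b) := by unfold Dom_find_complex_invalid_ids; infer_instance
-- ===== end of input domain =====

-- B differs from A by skipping, in one arithmetic jump, every whole block of consecutive idx
-- values whose length-≤L prefixes are all already known (objective: faster on wide ranges).

-- ===== PORT A =====
-- inner `while True` loop of A: candidate = int(str(pattern) * repeat); fueled totalization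
-- (the fuel only makes the recursion structural; on inputs admitted by Pre_ within Dom the
--  loop exits long before the fuel does, since candidates gain digits every round).
-- `int(s)` is PySem.Int.ofChars?; none = ValueError (Python raises; only outside Pre_).
def pvAInner (a b : Int) (pattern : List Char) : Nat → Int → PySem.Set Int → PySem.Set Int × Int
  | 0, rep, res => (res, rep)
  | fuel+1, rep, res =>
    match PySem.Int.ofChars? (PySem.List.pyRepeat pattern rep) with
    | none => (res, rep)      -- int() raises here in Python (outside Pre_)
    | some candidate =>
      if candidate > b then (res, rep)
      else pvAInner a b pattern fuel (rep + 1)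
        (if candidate ≥ a then PySem.Set.add res candidate else res)

-- the `for prefix_length in range(1, len(str(a)) + 1)` loop with its continue/break
def pvAFor (a b idx : Int) :
    List Int → PySem.Set (List Char) → PySem.Set Int → PySem.Set (List Char) × PySem.Set Int
  | [], patterns, res => (patterns, res)
  | pl :: rest, patterns, res =>
    let pattern := PySem.List.slice (PySem.Int.toChars idx) none (some pl)
    if PySem.Set.contains patterns pattern then pvAFor a b idx rest patterns res
    else
      let patterns' := PySem.Set.add patterns pattern
      let inner := pvAInner a b pattern 64 2 res
      if inner.2 == 2 then (patterns', inner.1)        -- `if repeat == 2: break`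
      else pvAFor a b idx rest patterns' inner.1

-- the outer `while idx <= b` loop
def pvALoop (a b idx : Int) (patterns : PySem.Set (List Char)) (res : PySem.Set Int) :
    PySem.Set Int :=
  if h : idx ≤ b then
    let st := pvAFor a b idx
      (PySem.List.pyRange 1 (PySem.Str.len (PySem.Int.toStr a) + 1) 1) patterns res
    pvALoop a b (idx + 1) st.1 st.2
  else res
termination_by (b + 1 - idx).toNat
decreasing_by omega

def find_complex_invalid_ids (a : Int) (b : Int) : List Int :=
  pvALoop a b a PySem.Set.empty PySem.Set.empty

-- ===== PORT B =====
-- inner `while c <= b` loop of B: the repeated string grows by `t = t + p`; fueled totalization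
def pvBInner (a b : Int) (p : List Char) :
    Nat → List Char → Int → PySem.Dict Int (Option Unit) → PySem.Dict Int (Option Unit)
  | 0, _, _, found => found
  | fuel+1, t, c, found =>
    if c ≤ b then
      let found' := if c ≥ a then found.insert c none else found
      let t' := t ++ p
      match PySem.Int.ofChars? t' with
      | none => found'        -- int() raises here in Python (outside Pre_)
      | some c' => pvBInner a b p fuel t' c' found'
    else found

-- the `for ch in s[:L]` loop of B, accumulating the prefix p character by character
def pvBFor (a b : Int) :
    List Char → List Char → PySem.Dict (List Char) (Option Unit) → PySem.Dict Int (Option Unit) →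
    PySem.Dict (List Char) (Option Unit) × PySem.Dict Int (Option Unit)
  | [], _, seen, found => (seen, found)
  | ch :: rest, p, seen, found =>
    let p' := p ++ [ch]
    if PySem.Dict.contains seen p' then pvBFor a b rest p' seen found
    else
      let seen' := seen.insert p' none
      let t := p' ++ p'
      match PySem.Int.ofChars? t with
      | none => (seen', found)                          -- break (Python raises; outside Pre_)
      | some c =>
        if c > b then (seen', found)                    -- break
        else pvBFor a b rest p' seen' (pvBInner a b p' 64 t c found)

-- the outer `while idx <= b` loop of B with the block jump
-- (`10 ** m` is ported on m.toNat: inside Pre_ the exponent m = len(str(idx)) - L is ≥ 0)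
def pvBLoop (a b L idx : Int) (seen : PySem.Dict (List Char) (Option Unit))
    (found : PySem.Dict Int (Option Unit)) : PySem.Dict Int (Option Unit) :=
  if h : idx ≤ b then
    let s := PySem.Int.toChars idx
    if PySem.Dict.contains seen (PySem.List.slice s none (some L)) then
      let m := PySem.List.len s - L
      let step := (10 : Int) ^ m.toNat
      pvBLoop a b L ((PySem.Int.floordiv idx step + 1) * step) seen found
    else
      let st := pvBFor a b (PySem.List.slice s none (some L)) [] seen found
      pvBLoop a b L (idx + 1) st.1 st.2
  else found
termination_by (b + 1 - idx).toNat
decreasing_by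
  · have hs : (0:Int) < (10 : Int) ^ ((PySem.List.len (PySem.Int.toChars idx) - L).toNat) :=
      pow_pos (by norm_num) _
    have := Int.lt_ediv_add_one_mul_self idx hs
    have hfd := PySem.Int.floordiv_eq_ediv_of_pos (a := idx) hs
    rw [hfd]; omega
  · omega

def find_complex_invalid_ids_alt (a : Int) (b : Int) : List Int :=
  PySem.Set.ofList
    (PySem.Dict.keys (pvBLoop a b (PySem.Str.len (PySem.Int.toStr a)) a PySem.Dict.empty PySem.Dict.empty))

-- ===== PRECONDITION & SPEC =====
-- Pre_ excludes exactly the inputs on which Python A does not return: with a ≤ 0 ≤ b? No —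
-- with a ≤ 0 and a ≤ b, A either raises ValueError (a < 0: int('--') on the '-' prefix) or
-- loops forever (a = 0: int('00') = 0 never exceeds b). When b < a, A returns set() for any a.
def Pre_find_complex_invalid_ids (a : Int) (b : Int) : Prop := 1 ≤ a ∨ b < a
instance (a : Int) (b : Int) : Decidable (Pre_find_complex_invalid_ids a b) := by
  unfold Pre_find_complex_invalid_ids; infer_instance

def pvWitness_find_complex_invalid_ids : Int × Int := (95, 8000)

def Spec_find_complex_invalid_ids (a : Int) (b : Int) (out : List Int) : Prop :=
  out = find_complex_invalid_ids_alt a b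
instance (a : Int) (b : Int) (out : List Int) : Decidable (Spec_find_complex_invalid_ids a b out) := by
  unfold Spec_find_complex_invalid_ids; infer_instance

-- ===== CLAIM (what is proved, stated in full; the proofs are below) =====
def Claim_equal_find_complex_invalid_ids : Prop :=
  ∀ (a : Int) (b : Int), Dom_find_complex_invalid_ids a b →
    Pre_find_complex_invalid_ids a b →
    Spec_find_complex_invalid_ids a b (find_complex_invalid_ids a b)

-- ===== LEMMAS AND PROOFS =====

-- decimal characters of a positive Nat, big-endian
def pvNch (n : Nat) : List Char := ((Nat.digits 10 n).map Nat.digitChar).reverse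

theorem pvToDigitsCore_eq (f : Nat) : ∀ (n : Nat) (acc : List Char), 0 < n → n < 10 ^ f →
    Nat.toDigitsCore 10 f n acc = pvNch n ++ acc := by
  induction f with
  | zero => intro n acc h1 h2; omega
  | succ f ih =>
    intro n acc h1 h2
    rw [Nat.toDigitsCore]
    by_cases h : n / 10 = 0
    · have hlt : n < 10 := by omega
      simp only [h, if_true]
      rw [pvNch, Nat.digits_of_lt 10 n (by omega) hlt]
      simp [Nat.mod_eq_of_lt hlt]
    · simp only [h, if_false]
      rw [ih (n / 10) _ (by omega) (by
        have h10 : (10:Nat) ^ (f+1) = 10 * 10 ^ f := by ring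
        rw [h10] at h2
        exact Nat.div_lt_of_lt_mul (by omega))]
      have hd : Nat.digits 10 n = n % 10 :: Nat.digits 10 (n / 10) :=
        Nat.digits_def' (by norm_num : (1:Nat) < 10) (by omega)
      rw [pvNch, pvNch, hd]
      simp
theorem pvToChars_eq (n : Int) (h : 1 ≤ n) : PySem.Int.toChars n = pvNch n.toNat := by
  rw [PySem.Int.toChars]
  have : ¬ n < 0 := by omega
  simp only [this, if_false]
  rw [Nat.toDigits, pvToDigitsCore_eq _ _ _ (by omega)]
  · simp
  · calc n.toNat < 10 ^ n.toNat := Nat.lt_pow_self (by norm_num)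
      _ ≤ 10 ^ (n.toNat + 1) := Nat.pow_le_pow_right (by norm_num) (by omega)

theorem pvNch_length (n : Nat) : (pvNch n).length = (Nat.digits 10 n).length := by
  simp [pvNch]

theorem pvNch_ne_nil (n : Nat) (h : 0 < n) : pvNch n ≠ [] := by
  simp [pvNch, Nat.digits_ne_nil_iff_ne_zero]; omega

theorem pvNch_len_mono {m n : Nat} (hm : 0 < m) (hmn : m ≤ n) :
    (pvNch m).length ≤ (pvNch n).length := by
  rw [pvNch_length, pvNch_length,
    Nat.length_digits 10 m (by norm_num) (by omega),
    Nat.length_digits 10 n (by norm_num) (by omega)]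
  have := Nat.log_mono_right (b := 10) hmn
  omega

-- decimal split: for q ≥ 1 and r < 10^m, the digits of r + 10^m * q are the digits of q
-- followed by m further characters
theorem pvNch_split (q r m : Nat) (hq : 0 < q) (hr : r < 10 ^ m) :
    ∃ tail : List Char, pvNch (r + 10 ^ m * q) = pvNch q ++ tail ∧ tail.length = m := by
  have hlen : (Nat.digits 10 r).length ≤ m := (Nat.digits_length_le_iff (by norm_num) r).mpr hr
  have key := Nat.digits_append_zeroes_append_digits
    (b := 10) (k := m - (Nat.digits 10 r).length) (m := q) (n := r) (by norm_num) hq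
  have hm' : (Nat.digits 10 r).length + (m - (Nat.digits 10 r).length) = m := by omega
  rw [hm'] at key
  refine ⟨List.replicate (m - (Nat.digits 10 r).length) (Nat.digitChar 0) ++
      ((Nat.digits 10 r).map Nat.digitChar).reverse, ?_, ?_⟩
  · rw [pvNch, ← key]
    simp [pvNch]
  · simp; omega

-- ---- correspondence glue: PySem.Set state of A vs PySem.Dict state of B ----
theorem pvContains_corr {α : Type} [BEq α] [LawfulBEq α] {ν : Type}
    (s : PySem.Set α) (d : PySem.Dict α ν) (h : s = d.keys) (x : α) :
    PySem.Set.contains s x = PySem.Dict.contains d x := by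
  by_cases hx : x ∈ d.keys
  · rw [(PySem.Set.contains_iff s x).mpr (h ▸ hx), (PySem.Dict.contains_iff_mem_keys d x).mpr hx]
  · have h1 : PySem.Set.contains s x ≠ true := fun hc => hx (h ▸ (PySem.Set.contains_iff s x).mp hc)
    have h2 : PySem.Dict.contains d x ≠ true := fun hc => hx ((PySem.Dict.contains_iff_mem_keys d x).mp hc)
    simp only [Bool.not_eq_true] at h1 h2; rw [h1, h2]

theorem pvAdd_corr {α : Type} [BEq α] [LawfulBEq α] {ν : Type}
    (s : PySem.Set α) (d : PySem.Dict α ν) (h : s = d.keys) (x : α) (v : ν) :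
    PySem.Set.add s x = (d.insert x v).keys := by
  by_cases hx : x ∈ d.keys
  · rw [PySem.Set.add_of_mem (h ▸ hx), PySem.Dict.keys_insert_of_contains d v
      ((PySem.Dict.contains_iff_mem_keys d x).mpr hx), h]
  · have hc : PySem.Dict.contains d x = false := by
      have := (PySem.Dict.contains_iff_mem_keys d x); simp [hx] at this; exact this
    rw [PySem.Set.add_of_not_mem (h ▸ hx), PySem.Dict.keys_insert_of_not_contains d v hc, h]

-- ---- string repetition: str(p) * k grows by one copy of p ----
theorem pvRepeat_two (p : List Char) : PySem.List.pyRepeat p 2 = p ++ p := by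
  simp [PySem.List.pyRepeat]

theorem pvRepeat_succ (p : List Char) (k : Int) (hk : 0 ≤ k) :
    PySem.List.pyRepeat p (k + 1) = PySem.List.pyRepeat p k ++ p := by
  rw [PySem.List.pyRepeat, PySem.List.pyRepeat]
  have : (k + 1).toNat = k.toNat + 1 := by omega
  rw [this, List.replicate_succ', List.flatten_append]
  simp

-- ---- the two inner repeat loops march in lockstep ----
theorem pvAInner_snd_ge (a b : Int) (p : List Char) :
    ∀ (fuel : Nat) (k : Int) (res : PySem.Set Int), k ≤ (pvAInner a b p fuel k res).2
  | 0, k, res => le_refl _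
  | fuel+1, k, res => by
    rw [pvAInner]
    cases PySem.Int.ofChars? (PySem.List.pyRepeat p k) with
    | none => exact le_refl _
    | some c =>
      simp only
      split
      · exact le_refl _
      · exact le_trans (by omega) (pvAInner_snd_ge a b p fuel (k+1) _)

theorem pvInner_corr (a b : Int) (p : List Char) :
    ∀ (fuel : Nat) (k : Int) (t : List Char) (c : Int)
      (res : PySem.Set Int) (found : PySem.Dict Int (Option Unit)),
      2 ≤ k → res = found.keys → t = PySem.List.pyRepeat p k →
      PySem.Int.ofChars? t = some c → c ≤ b →
      (pvAInner a b p fuel k res).1 = (pvBInner a b p fuel t c found).keys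
  | 0, k, t, c, res, found, hk, hres, ht, hc, hcb => hres
  | fuel+1, k, t, c, res, found, hk, hres, ht, hc, hcb => by
    rw [pvAInner, pvBInner, ← ht, hc]
    simp only [not_lt.mpr hcb, if_pos hcb]
    have hres1 : (if c ≥ a then PySem.Set.add res c else res) =
        (if c ≥ a then found.insert c none else found).keys := by
      split
      · exact pvAdd_corr _ _ hres c none
      · exact hres
    have ht' : t ++ p = PySem.List.pyRepeat p (k + 1) := by rw [ht, pvRepeat_succ p k (by omega)]
    cases hcc : PySem.Int.ofChars? (t ++ p) with
    | none =>
      cases fuel with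
      | zero => rw [pvAInner]; exact hres1
      | succ f =>
        rw [pvAInner, ← ht', hcc]
        exact hres1
    | some c' =>
      by_cases hcb' : c' ≤ b
      · exact pvInner_corr a b p fuel (k+1) (t ++ p) c' _ _ (by omega) hres1 ht' hcc hcb'
      · cases fuel with
        | zero => rw [pvAInner]; exact hres1
        | succ f =>
          rw [pvAInner, ← ht', hcc]
          simp only [if_pos (by omega : c' > b)]
          rw [pvBInner]
          simp only [if_neg hcb']
          exact hres1

-- prefix-closure invariant of A's pattern set
def pvClosed (patterns : PySem.Set (List Char)) : Prop :=
  ∀ p ∈ patterns, ∀ l, 1 ≤ l → l < p.length → p.take l ∈ patterns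

-- ---- the per-idx prefix loops of A and B march in lockstep ----
theorem pvFor_corr (a b idx : Int) (s : List Char) (LN : Nat) (hsL : LN ≤ s.length)
    (hs : PySem.Int.toChars idx = s) :
    ∀ (n j : Nat), j + n = LN →
    ∀ (patterns : PySem.Set (List Char)) (res : PySem.Set Int)
      (seen : PySem.Dict (List Char) (Option Unit)) (found : PySem.Dict Int (Option Unit)),
      patterns = seen.keys → res = found.keys → pvClosed patterns →
      (∀ l, 1 ≤ l → l ≤ j → s.take l ∈ patterns) →
      (pvAFor a b idx (PySem.List.pyRange ((j:Int)+1) ((LN:Int)+1) 1) patterns res).1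
        = (pvBFor a b ((s.take LN).drop j) (s.take j) seen found).1.keys ∧
      (pvAFor a b idx (PySem.List.pyRange ((j:Int)+1) ((LN:Int)+1) 1) patterns res).2
        = (pvBFor a b ((s.take LN).drop j) (s.take j) seen found).2.keys ∧
      pvClosed (pvAFor a b idx (PySem.List.pyRange ((j:Int)+1) ((LN:Int)+1) 1) patterns res).1 := by
  intro n
  induction n with
  | zero =>
    intro j hj patterns res seen found hcorrS hcorrR hclosed hprev
    have hj' : j = LN := by omega
    subst hj'
    have hrange : PySem.List.pyRange ((j:Int)+1) ((j:Int)+1) 1 = [] := by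
      rw [PySem.List.pyRange_one]; simp
    have hdrop : (s.take j).drop j = [] := by
      apply List.drop_eq_nil_of_le; simp
    rw [hrange, hdrop, pvAFor, pvBFor]
    exact ⟨hcorrS, hcorrR, hclosed⟩
  | succ n ih =>
    intro j hj patterns res seen found hcorrS hcorrR hclosed hprev
    have hjL : j < LN := by omega
    have hjs : j < s.length := by omega
    -- unfold one element on each side
    have hrange : PySem.List.pyRange ((j:Int)+1) ((LN:Int)+1) 1
        = ((j:Int)+1) :: PySem.List.pyRange ((j:Int)+1+1) ((LN:Int)+1) 1 :=
      PySem.List.pyRange_one_cons (by omega)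
    have hdrop : (s.take LN).drop j = s[j] :: (s.take LN).drop (j+1) := by
      rw [List.drop_eq_getElem_cons (by simp; omega : j < (s.take LN).length)]
      simp [List.getElem_take]
    have hpat : PySem.List.slice (PySem.Int.toChars idx) none (some ((j:Int)+1)) = s.take (j+1) := by
      rw [hs, PySem.List.slice_to _ (by omega : (0:Int) ≤ (j:Int)+1)]
      norm_num
    have htakesucc : s.take j ++ [s[j]] = s.take (j+1) := by
      rw [← List.take_concat_get hjs]; simp
    rw [hrange, hdrop, pvAFor, pvBFor]
    simp only [hpat, htakesucc]
    have hcont : PySem.Set.contains patterns (s.take (j+1)) = PySem.Dict.contains seen (s.take (j+1)) :=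
      pvContains_corr patterns seen hcorrS _
    rw [← hcont]
    have hjc : ((j:Int)+1+1) = (((j+1:Nat)):Int)+1 := by push_cast; ring
    by_cases hmem : s.take (j+1) ∈ patterns
    · rw [(PySem.Set.contains_iff patterns _).mpr hmem]
      simp only [if_true]
      rw [hjc]
      exact ih (j+1) (by omega) patterns res seen found hcorrS hcorrR hclosed
        (fun l hl1 hl2 => by
          rcases Nat.lt_or_ge l (j+1) with h | h
          · exact hprev l hl1 (by omega)
          · have : l = j+1 := by omega
            rw [this]; exact hmem)
    · have hcf : PySem.Set.contains patterns (s.take (j+1)) = false := by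
        rcases Bool.eq_false_or_eq_true (PySem.Set.contains patterns (s.take (j+1))) with h | h
        · exact absurd ((PySem.Set.contains_iff patterns _).mp h) hmem
        · exact h
      rw [hcf]
      simp only [Bool.false_eq_true, if_false]
      have hlen' : (s.take (j+1)).length = j + 1 := by
        rw [List.length_take]; omega
      have hmemadd : s.take (j+1) ∈ PySem.Set.add patterns (s.take (j+1)) :=
        (PySem.Set.mem_add patterns _ _).mpr (Or.inr rfl)
      have hclosed' : pvClosed (PySem.Set.add patterns (s.take (j+1))) := by
        intro p hp l hl1 hl2
        rcases (PySem.Set.mem_add patterns _ p).mp hp with hpo | hpe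
        · exact (PySem.Set.mem_add patterns _ _).mpr (Or.inl (hclosed p hpo l hl1 hl2))
        · subst hpe
          rw [hlen'] at hl2
          have ht : (s.take (j+1)).take l = s.take l := by
            rw [List.take_take]; congr 1; omega
          rw [ht]
          exact (PySem.Set.mem_add patterns _ _).mpr (Or.inl (hprev l hl1 (by omega)))
      have hprev' : ∀ l, 1 ≤ l → l ≤ j+1 → s.take l ∈ PySem.Set.add patterns (s.take (j+1)) := by
        intro l hl1 hl2
        rcases Nat.lt_or_ge l (j+1) with h | h
        · exact (PySem.Set.mem_add patterns _ _).mpr (Or.inl (hprev l hl1 (by omega)))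
        · have : l = j+1 := by omega
          rw [this]; exact hmemadd
      have hcorrS' : PySem.Set.add patterns (s.take (j+1))
          = (seen.insert (s.take (j+1)) none).keys := pvAdd_corr _ _ hcorrS _ none
      cases hc : PySem.Int.ofChars? (s.take (j+1) ++ s.take (j+1)) with
      | none =>
        have hAi : pvAInner a b (s.take (j+1)) 64 2 res = (res, 2) := by
          rw [show (64:Nat) = 63+1 from rfl, pvAInner, pvRepeat_two, hc]
        rw [hAi]
        simp only [beq_self_eq_true, if_true]
        exact ⟨hcorrS', hcorrR, hclosed'⟩
      | some c =>
        by_cases hcb : c > b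
        · have hAi : pvAInner a b (s.take (j+1)) 64 2 res = (res, 2) := by
            rw [show (64:Nat) = 63+1 from rfl, pvAInner, pvRepeat_two, hc]
            simp [hcb]
          rw [hAi]
          simp only [beq_self_eq_true, if_true, if_pos hcb]
          exact ⟨hcorrS', hcorrR, hclosed'⟩
        · have hcble : c ≤ b := by omega
          have h1 : (pvAInner a b (s.take (j+1)) 64 2 res).1
              = (pvBInner a b (s.take (j+1)) 64 (s.take (j+1) ++ s.take (j+1)) c found).keys :=
            pvInner_corr a b _ 64 2 _ c res found (by norm_num) hcorrR (pvRepeat_two _).symm hc hcble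
          have h2 : ¬ (pvAInner a b (s.take (j+1)) 64 2 res).2 = 2 := by
            have hun : pvAInner a b (s.take (j+1)) 64 2 res
                = pvAInner a b (s.take (j+1)) 63 3 (if c ≥ a then PySem.Set.add res c else res) := by
              rw [show (64:Nat) = 63+1 from rfl, pvAInner, pvRepeat_two, hc]
              simp [hcb]
            rw [hun]
            have := pvAInner_snd_ge a b (s.take (j+1)) 63 3 (if c ≥ a then PySem.Set.add res c else res)
            omega
          have h2' : ((pvAInner a b (s.take (j+1)) 64 2 res).2 == 2) = false := by
            simp [h2]
          rw [h2']
          simp only [Bool.false_eq_true, if_false, if_neg hcb]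
          rw [hjc, h1]
          exact ih (j+1) (by omega) _ _ _ _ hcorrS' rfl hclosed' hprev'



-- ---- A's prefix loop is a no-op once every prefix of idx is already known ----
theorem pvAFor_noop (a b idx : Int) (LN : Nat)
    (patterns : PySem.Set (List Char)) (res : PySem.Set Int)
    (h : ∀ l : Nat, 1 ≤ l → l ≤ LN →
      PySem.List.slice (PySem.Int.toChars idx) none (some (l:Int)) ∈ patterns) :
    ∀ (n : Nat) (lo : Int), 1 ≤ lo → lo + n = (LN:Int) + 1 →
      pvAFor a b idx (PySem.List.pyRange lo ((LN:Int)+1) 1) patterns res = (patterns, res) := by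
  intro n
  induction n with
  | zero =>
    intro lo hlo1 hlo2
    have : PySem.List.pyRange lo ((LN:Int)+1) 1 = [] := by
      rw [PySem.List.pyRange_one]
      have : ((LN:Int) + 1 - lo).toNat = 0 := by omega
      rw [this]; simp
    rw [this, pvAFor]
  | succ n ih =>
    intro lo hlo1 hlo2
    rw [PySem.List.pyRange_one_cons (by omega), pvAFor]
    have hmem : PySem.List.slice (PySem.Int.toChars idx) none (some lo) ∈ patterns := by
      have hlo : lo = ((lo.toNat : Nat) : Int) := by omega
      rw [hlo]
      exact h lo.toNat (by omega) (by omega)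
    rw [(PySem.Set.contains_iff patterns _).mpr hmem]
    simp only [if_true]
    exact ih (lo + 1) (by omega) (by omega)

-- ---- A's outer loop can be advanced over a run of no-op indices ----
theorem pvALoop_skip (a b : Int) (patterns : PySem.Set (List Char)) (res : PySem.Set Int)
    (lo nxt : Int)
    (h : ∀ j : Int, lo ≤ j → j < nxt → j ≤ b →
      pvAFor a b j (PySem.List.pyRange 1 (PySem.Str.len (PySem.Int.toStr a) + 1) 1) patterns res
        = (patterns, res)) :
    ∀ (n : Nat) (idx : Int), lo ≤ idx → idx ≤ nxt → nxt - idx ≤ n →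
      pvALoop a b idx patterns res = pvALoop a b nxt patterns res := by
  intro n
  induction n with
  | zero =>
    intro idx h0 h1 h2
    have : idx = nxt := by omega
    rw [this]
  | succ n ih =>
    intro idx h0 h1 h2
    rcases eq_or_lt_of_le h1 with he | hlt
    · rw [he]
    · by_cases hb : idx ≤ b
      · rw [pvALoop, dif_pos hb, h idx h0 hlt hb]
        exact ih (idx + 1) (by omega) (by omega) (by omega)
      · rw [pvALoop, dif_neg hb, pvALoop, dif_neg (by omega : ¬ nxt ≤ b)]

-- ---- decimal block structure: all numbers in [q*10^m, (q+1)*10^m) share their top digits ----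
theorem pvBlock (idx : Int) (LN m : Nat) (_hidx : 1 ≤ idx) (hLN : 1 ≤ LN)
    (hlen : (pvNch idx.toNat).length = LN + m) :
    0 < idx.toNat / 10^m ∧ (pvNch (idx.toNat / 10^m)).length = LN ∧
    (∀ j : Nat, idx.toNat / 10^m * 10^m ≤ j → j < (idx.toNat / 10^m + 1) * 10^m →
      ∀ l : Nat, l ≤ LN → (pvNch j).take l = (pvNch (idx.toNat / 10^m)).take l) := by
  have hq : 0 < idx.toNat / 10^m := by
    have h10 : (10:Nat)^m ≤ idx.toNat := by
      rw [← Nat.lt_digits_length_iff (by norm_num : (1:Nat) < 10)]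
      rw [pvNch_length] at hlen; omega
    exact Nat.div_pos h10 (by positivity)
  have hdecomp : idx.toNat % 10^m + 10^m * (idx.toNat / 10^m) = idx.toNat := by
    rw [Nat.mod_add_div]
  obtain ⟨tail, htail, htlen⟩ := pvNch_split (idx.toNat / 10^m) (idx.toNat % 10^m) m hq
    (Nat.mod_lt _ (by positivity))
  rw [hdecomp] at htail
  have hqlen : (pvNch (idx.toNat / 10^m)).length = LN := by
    have := congrArg List.length htail
    simp [htlen] at this
    omega
  refine ⟨hq, hqlen, ?_⟩
  intro j hj1 hj2 l hl
  have hjq : j / 10^m = idx.toNat / 10^m := by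
    apply Nat.div_eq_of_lt_le
    · omega
    · omega
  have hjdecomp : j % 10^m + 10^m * (idx.toNat / 10^m) = j := by
    rw [← hjq, Nat.mod_add_div]
  obtain ⟨tail2, htail2, htlen2⟩ := pvNch_split (idx.toNat / 10^m) (j % 10^m) m hq
    (Nat.mod_lt _ (by positivity))
  rw [hjdecomp] at htail2
  rw [htail2, List.take_append_of_le_length (by omega)]

-- ---- B's dict of results keeps its keys nodup ----
theorem pvBInner_nodup (a b : Int) (p : List Char) :
    ∀ (fuel : Nat) (t : List Char) (c : Int) (found : PySem.Dict Int (Option Unit)),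
      found.keys.Nodup → (pvBInner a b p fuel t c found).keys.Nodup
  | 0, t, c, found, h => h
  | fuel+1, t, c, found, h => by
    rw [pvBInner]
    dsimp only
    split
    · have h1 : (if c ≥ a then found.insert c none else found).keys.Nodup := by
        split
        · exact PySem.Dict.nodup_keys_insert found c none h
        · exact h
      cases PySem.Int.ofChars? (t ++ p) with
      | none => exact h1
      | some c' => exact pvBInner_nodup a b p fuel (t ++ p) c' _ h1
    · exact h

theorem pvBFor_nodup (a b : Int) :
    ∀ (chs p : List Char) (seen : PySem.Dict (List Char) (Option Unit))
      (found : PySem.Dict Int (Option Unit)),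
      found.keys.Nodup → (pvBFor a b chs p seen found).2.keys.Nodup
  | [], p, seen, found, h => h
  | ch :: rest, p, seen, found, h => by
    rw [pvBFor]
    dsimp only
    split
    · exact pvBFor_nodup a b rest (p ++ [ch]) seen found h
    · cases PySem.Int.ofChars? ((p ++ [ch]) ++ (p ++ [ch])) with
      | none => exact h
      | some c =>
        by_cases hcb : c > b
        · simp only [if_pos hcb]; exact h
        · simp only [if_neg hcb]
          exact pvBFor_nodup a b rest (p ++ [ch]) _ _ (pvBInner_nodup a b _ 64 _ c found h)

-- ---- B keeps keys nodup through its outer loop ----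
theorem pvBLoop_nodup (a b L : Int) :
    ∀ (n : Nat) (idx : Int), (b + 1 - idx).toNat ≤ n →
    ∀ (seen : PySem.Dict (List Char) (Option Unit)) (found : PySem.Dict Int (Option Unit)),
      found.keys.Nodup → (pvBLoop a b L idx seen found).keys.Nodup := by
  intro n
  induction n with
  | zero =>
    intro idx hn seen found h
    rw [pvBLoop, dif_neg (by omega : ¬ idx ≤ b)]
    exact h
  | succ n ih =>
    intro idx hn seen found h
    by_cases hb : idx ≤ b
    · rw [pvBLoop, dif_pos hb]
      dsimp only
      split
      · have hpos : idx < (PySem.Int.floordiv idx ((10:Int) ^ (PySem.List.len (PySem.Int.toChars idx) - L).toNat) + 1) * (10:Int) ^ (PySem.List.len (PySem.Int.toChars idx) - L).toNat := by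
          have hs : (0:Int) < (10 : Int) ^ ((PySem.List.len (PySem.Int.toChars idx) - L).toNat) := pow_pos (by norm_num) _
          have := Int.lt_ediv_add_one_mul_self idx hs
          rw [PySem.Int.floordiv_eq_ediv_of_pos hs]
          omega
        exact ih _ (by omega) seen found h
      · exact ih _ (by omega) _ _ (pvBFor_nodup a b _ [] seen found h)
    · rw [pvBLoop, dif_neg hb]
      exact h

-- ---- main lockstep: A's outer loop against B's block-skipping outer loop ----
theorem pvMain (a b : Int) (ha : 1 ≤ a) :
    ∀ (n : Nat) (idx : Int), a ≤ idx → (b + 1 - idx).toNat ≤ n →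
    ∀ (patterns : PySem.Set (List Char)) (res : PySem.Set Int)
      (seen : PySem.Dict (List Char) (Option Unit)) (found : PySem.Dict Int (Option Unit)),
      patterns = seen.keys → res = found.keys → pvClosed patterns →
      pvALoop a b idx patterns res
        = (pvBLoop a b (PySem.Str.len (PySem.Int.toStr a)) idx seen found).keys := by
  have hL : PySem.Str.len (PySem.Int.toStr a) = ((pvNch a.toNat).length : Int) := by
    rw [PySem.Str.len_eq, PySem.Int.toList_toStr, pvToChars_eq a ha]
  have hLN1 : 1 ≤ (pvNch a.toNat).length :=
    List.length_pos_of_ne_nil (pvNch_ne_nil _ (by omega))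
  intro n
  induction n with
  | zero =>
    intro idx hai hn patterns res seen found hcorrS hcorrR hclosed
    rw [pvALoop, dif_neg (by omega : ¬ idx ≤ b), pvBLoop, dif_neg (by omega : ¬ idx ≤ b)]
    exact hcorrR
  | succ n ih =>
    intro idx hai hn patterns res seen found hcorrS hcorrR hclosed
    by_cases hb : idx ≤ b
    · have hidx1 : (1:Int) ≤ idx := le_trans ha hai
      have hs : PySem.Int.toChars idx = pvNch idx.toNat := pvToChars_eq idx hidx1
      have hsL : (pvNch a.toNat).length ≤ (pvNch idx.toNat).length :=
        pvNch_len_mono (by omega) (by omega)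
      have hslice : PySem.List.slice (PySem.Int.toChars idx) none
          (some (PySem.Str.len (PySem.Int.toStr a)))
          = (pvNch idx.toNat).take ((pvNch a.toNat).length) := by
        rw [hL, PySem.List.slice_to _ (by positivity), hs, Int.toNat_natCast]
      rw [pvBLoop, dif_pos hb]
      dsimp only
      rw [hslice]
      by_cases hfast : (pvNch idx.toNat).take ((pvNch a.toNat).length) ∈ patterns
      · -- fast path: B jumps a whole block, A no-ops through it
        have hcont : PySem.Dict.contains seen ((pvNch idx.toNat).take ((pvNch a.toNat).length)) = true := by
          rw [← pvContains_corr patterns seen hcorrS]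
          exact (PySem.Set.contains_iff patterns _).mpr hfast
        rw [hcont]
        simp only [if_true]
        -- names for the block data
        have hmI : (PySem.List.len (PySem.Int.toChars idx) - PySem.Str.len (PySem.Int.toStr a))
            = (((pvNch idx.toNat).length - (pvNch a.toNat).length : Nat) : Int) := by
          rw [hs, PySem.List.len_eq, hL]; omega
        obtain ⟨hq, hqlen, hblock⟩ := pvBlock idx ((pvNch a.toNat).length)
          ((pvNch idx.toNat).length - (pvNch a.toNat).length) hidx1 hLN1 (by omega)
        have hstep : (10:Int) ^ ((PySem.List.len (PySem.Int.toChars idx) - PySem.Str.len (PySem.Int.toStr a)).toNat)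
            = (((10:Nat) ^ ((pvNch idx.toNat).length - (pvNch a.toNat).length) : Nat) : Int) := by
          rw [hmI, Int.toNat_natCast]; push_cast; ring
        have hcast : idx = ((idx.toNat : Nat) : Int) := by omega
        have hfd : PySem.Int.floordiv idx ((10:Int) ^ ((PySem.List.len (PySem.Int.toChars idx) - PySem.Str.len (PySem.Int.toStr a)).toNat))
            = ((idx.toNat / 10 ^ ((pvNch idx.toNat).length - (pvNch a.toNat).length) : Nat) : Int) := by
          rw [hstep, PySem.Int.floordiv_eq_ediv_of_pos (by positivity)]
          rw [Int.natCast_div, ← hcast]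
        have hnxt : (PySem.Int.floordiv idx ((10:Int) ^ ((PySem.List.len (PySem.Int.toChars idx) - PySem.Str.len (PySem.Int.toStr a)).toNat)) + 1)
              * (10:Int) ^ ((PySem.List.len (PySem.Int.toChars idx) - PySem.Str.len (PySem.Int.toStr a)).toNat)
            = (((idx.toNat / 10 ^ ((pvNch idx.toNat).length - (pvNch a.toNat).length) + 1)
                * 10 ^ ((pvNch idx.toNat).length - (pvNch a.toNat).length) : Nat) : Int) := by
          rw [hfd, hstep]; push_cast; ring
        have hmod := Nat.mod_add_div idx.toNat (10 ^ ((pvNch idx.toNat).length - (pvNch a.toNat).length))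
        have hmodlt : idx.toNat % 10 ^ ((pvNch idx.toNat).length - (pvNch a.toNat).length)
            < 10 ^ ((pvNch idx.toNat).length - (pvNch a.toNat).length) :=
          Nat.mod_lt _ (by positivity)
        have hbounds : idx.toNat / 10 ^ ((pvNch idx.toNat).length - (pvNch a.toNat).length)
              * 10 ^ ((pvNch idx.toNat).length - (pvNch a.toNat).length) ≤ idx.toNat
            ∧ idx.toNat < (idx.toNat / 10 ^ ((pvNch idx.toNat).length - (pvNch a.toNat).length) + 1)
              * 10 ^ ((pvNch idx.toNat).length - (pvNch a.toNat).length) := by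
          have h2 := Nat.div_add_mod idx.toNat (10 ^ ((pvNch idx.toNat).length - (pvNch a.toNat).length))
          have h3 : (10 ^ ((pvNch idx.toNat).length - (pvNch a.toNat).length)) * (idx.toNat / 10 ^ ((pvNch idx.toNat).length - (pvNch a.toNat).length))
              = idx.toNat / 10 ^ ((pvNch idx.toNat).length - (pvNch a.toNat).length) * (10 ^ ((pvNch idx.toNat).length - (pvNch a.toNat).length)) := Nat.mul_comm _ _
          have h4 : (idx.toNat / 10 ^ ((pvNch idx.toNat).length - (pvNch a.toNat).length) + 1) * 10 ^ ((pvNch idx.toNat).length - (pvNch a.toNat).length)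
              = idx.toNat / 10 ^ ((pvNch idx.toNat).length - (pvNch a.toNat).length) * 10 ^ ((pvNch idx.toNat).length - (pvNch a.toNat).length) + 10 ^ ((pvNch idx.toNat).length - (pvNch a.toNat).length) := by ring
          omega
        have hnoop : ∀ j : Int, idx ≤ j →
            j < (((idx.toNat / 10 ^ ((pvNch idx.toNat).length - (pvNch a.toNat).length) + 1)
                * 10 ^ ((pvNch idx.toNat).length - (pvNch a.toNat).length) : Nat) : Int) → j ≤ b →
            pvAFor a b j (PySem.List.pyRange 1 (PySem.Str.len (PySem.Int.toStr a) + 1) 1) patterns res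
              = (patterns, res) := by
          intro j hj1 hj2 hjb
          rw [hL]
          apply pvAFor_noop a b j ((pvNch a.toNat).length) patterns res ?_ ((pvNch a.toNat).length) 1
            (by omega) (by omega)
          intro l hl1 hl2
          have hj1' : (1:Int) ≤ j := by omega
          have hjs : PySem.Int.toChars j = pvNch j.toNat := pvToChars_eq j hj1'
          have hjtake : (pvNch j.toNat).take l = (pvNch idx.toNat).take l := by
            rw [hblock j.toNat (by omega) (by omega) l hl2,
              ← hblock idx.toNat (by omega) (by omega) l hl2]
          rw [PySem.List.slice_to _ (by positivity), hjs, Int.toNat_natCast, hjtake]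
          rcases Nat.lt_or_ge l ((pvNch a.toNat).length) with hllt | hlge
          · have := hclosed _ hfast l hl1
              (by rw [List.length_take]; omega)
            rwa [List.take_take, min_eq_left (by omega)] at this
          · have : l = (pvNch a.toNat).length := by omega
            rw [this]; exact hfast
        have hnxtgt : idx < (((idx.toNat / 10 ^ ((pvNch idx.toNat).length - (pvNch a.toNat).length) + 1)
            * 10 ^ ((pvNch idx.toNat).length - (pvNch a.toNat).length) : Nat) : Int) := by omega
        rw [pvALoop_skip a b patterns res idx _ hnoop
          ((((idx.toNat / 10 ^ ((pvNch idx.toNat).length - (pvNch a.toNat).length) + 1)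
            * 10 ^ ((pvNch idx.toNat).length - (pvNch a.toNat).length) : Nat) : Int) - idx).toNat idx
          (le_refl _) (by omega) (by omega)]
        rw [hnxt]
        have hmeas : (b + 1 - (((idx.toNat / 10 ^ ((pvNch idx.toNat).length - (pvNch a.toNat).length) + 1)
            * 10 ^ ((pvNch idx.toNat).length - (pvNch a.toNat).length) : Nat) : Int)).toNat ≤ n := by
          revert hnxtgt hn
          generalize (((idx.toNat / 10 ^ ((pvNch idx.toNat).length - (pvNch a.toNat).length) + 1)
            * 10 ^ ((pvNch idx.toNat).length - (pvNch a.toNat).length) : Nat) : Int) = NXT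
          intro h1 h2
          omega
        exact ih _ (le_trans hai (le_of_lt hnxtgt)) hmeas patterns res seen found hcorrS hcorrR hclosed
      · -- slow path: both process idx, then advance by one
        have hcont : PySem.Dict.contains seen ((pvNch idx.toNat).take ((pvNch a.toNat).length)) = false := by
          rw [← pvContains_corr patterns seen hcorrS]
          rcases Bool.eq_false_or_eq_true (PySem.Set.contains patterns ((pvNch idx.toNat).take ((pvNch a.toNat).length))) with h | h
          · exact absurd ((PySem.Set.contains_iff patterns _).mp h) hfast
          · exact h
        rw [hcont]
        simp only [Bool.false_eq_true, if_false]
        obtain ⟨h1, h2, h3⟩ := pvFor_corr a b idx (pvNch idx.toNat) ((pvNch a.toNat).length)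
          hsL hs ((pvNch a.toNat).length) 0 (by omega) patterns res seen found hcorrS hcorrR hclosed
          (by intro l hl1 hl2; omega)
        have hone : (((0:Nat) : Int) + 1) = 1 := by norm_num
        rw [hone] at h1 h2 h3
        simp only [List.drop_zero, List.take_zero] at h1 h2 h3
        rw [← hL] at h1 h2 h3
        rw [pvALoop, dif_pos hb]
        dsimp only
        rw [h1, h2]
        exact ih (idx + 1) (by omega) (by omega) _ _
          (pvBFor a b (List.take (pvNch a.toNat).length (pvNch idx.toNat)) [] seen found).1
          (pvBFor a b (List.take (pvNch a.toNat).length (pvNch idx.toNat)) [] seen found).2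
          rfl rfl (h1 ▸ h3)
    · rw [pvALoop, dif_neg hb, pvBLoop, dif_neg hb]
      exact hcorrR

-- ---- assembling the verdict ----
theorem pvFinal (a b : Int) (hpre : Pre_find_complex_invalid_ids a b) :
    find_complex_invalid_ids a b = find_complex_invalid_ids_alt a b := by
  rcases Decidable.em (b < a) with hba | hba
  · rw [find_complex_invalid_ids, find_complex_invalid_ids_alt,
      pvALoop, dif_neg (by omega : ¬ a ≤ b), pvBLoop, dif_neg (by omega : ¬ a ≤ b),
      PySem.Dict.keys_empty]
    rfl
  · have ha : 1 ≤ a := by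
      rcases hpre with h | h
      · exact h
      · omega
    have hmain := pvMain a b ha (b + 1 - a).toNat a (le_refl a) (le_refl _)
      PySem.Set.empty PySem.Set.empty PySem.Dict.empty PySem.Dict.empty
      (by rw [PySem.Dict.keys_empty]; rfl) (by rw [PySem.Dict.keys_empty]; rfl)
      (by intro p hp; simp [PySem.Set.empty_eq] at hp)
    rw [find_complex_invalid_ids, find_complex_invalid_ids_alt, hmain,
      PySem.Set.ofList_eq_self_of_nodup _
        (pvBLoop_nodup a b _ (b + 1 - a).toNat a (le_refl _) PySem.Dict.empty PySem.Dict.empty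
          (by rw [PySem.Dict.keys_empty]; exact List.nodup_nil))]

-- ===== VERDICT (by name: the statement is the Claim_ definition above) =====
theorem find_complex_invalid_ids_spec : Claim_equal_find_complex_invalid_ids := by
  intro a b _hdom hpre
  unfold Spec_find_complex_invalid_ids
  exact pvFinal a b hpre
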